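-- pv_equiv track=rewrite | github.com/Jyoti-code/Leetcode-Solution | 154.  Find the Divisibility Array of a String.py | divisibilityArray
-- ===== SOURCE A (Python) =====
-- from typing import List
--
-- def divisibilityArray(word: str, m: int) -> List[int]:
--     s=[0 for i in range(len(word))]
--     curr=0
--     for i in range(len(word)):
--         curr=(curr*10+(int(word[i])))%m
--         if curr==0:
--             s[i]=1
--     return s
-- ===== SOURCE B (Python) =====
-- from typing import List
--
-- def divisibilityArray(word: str, m: int) -> List[int]:
--     # Divide and conquer: prefix remainders of a block are the left half's remainders
--     # followed by the right half's remainders shifted by rL * 10^k (mod m), since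
--     # int(L + R[:k]) = int(L) * 10**k + int(R[:k]).
--     ds = [int(c) for c in word]
--
--     def prefrems(ds: List[int]) -> List[int]:
--         if len(ds) <= 1:
--             return [d % m for d in ds]
--         mid = len(ds) // 2
--         out = prefrems(ds[:mid])
--         right = prefrems(ds[mid:])
--         rL = out[-1]
--         pw = 10 % m
--         for rr in right:
--             out.append((rL * pw + rr) % m)
--             pw = pw * 10 % m
--         return out
--
--     return [1 if r == 0 else 0 for r in prefrems(ds)]
-- ===== Notes on version B (the rewrite author's own statement) =====
-- stated objective: alternative
-- what changed: Replaces A's single left-to-right Horner loop (running remainder, flag set in place) by a divide-and-conquer on the digit list: recursively compute each half's prefix remainders and splice the right half in by shifting with rL*10^k mod m (since int(L+R[:k]) = int(L)*10^k + int(R[:k])), then map remainders to 0/1.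
import Mathlib
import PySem

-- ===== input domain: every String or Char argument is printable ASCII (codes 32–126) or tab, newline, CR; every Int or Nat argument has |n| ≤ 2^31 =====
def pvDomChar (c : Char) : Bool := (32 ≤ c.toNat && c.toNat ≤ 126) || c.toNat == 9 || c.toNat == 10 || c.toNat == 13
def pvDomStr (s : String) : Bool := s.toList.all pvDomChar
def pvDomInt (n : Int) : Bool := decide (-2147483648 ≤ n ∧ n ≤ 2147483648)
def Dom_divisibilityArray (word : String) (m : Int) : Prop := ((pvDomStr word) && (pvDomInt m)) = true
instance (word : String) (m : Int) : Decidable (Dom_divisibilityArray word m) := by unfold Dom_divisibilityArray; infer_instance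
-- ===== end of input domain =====

-- B replaces A's single left-to-right Horner loop by a divide-and-conquer on the digit list
-- (solve both halves, then shift the right half's remainders by rL·10^k mod m); alternative algorithm, same results.


-- ===== PORT A =====
-- s=[0]*n; curr=0; for i in range(n): curr=(curr*10+int(word[i]))%m; if curr==0: s[i]=1
def divisibilityArray (word : String) (m : Int) : List Int :=
  let cs := word.toList
  let init : List Int := (List.range cs.length).map (fun _ => (0 : Int))
  ((PySem.List.pyRange 0 cs.length 1).foldl
    (fun (st : List Int × Int) i =>
      let curr := PySem.Int.mod (st.2 * 10 + (PySem.Int.ofChars? [PySem.List.pyGetD cs i ' ']).getD 0) m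
      if curr == 0 then (PySem.List.pySetD st.1 i 1, curr) else (st.1, curr))
    (init, 0)).1

-- ===== PORT B =====
-- int(c) for one character c
def pvDigit (c : Char) : Int := (PySem.Int.ofChars? [c]).getD 0

-- prefrems(ds): divide and conquer — prefix remainders of the left half, then the right
-- half's prefix remainders shifted by rL*10^k (mod m), pw scanning 10^k mod m
def pvPrefRems (m : Int) (ds : List Int) : List Int :=
  if _h : ds.length ≤ 1 then ds.map (fun d => PySem.Int.mod d m)
  else
    let mid := ds.length / 2
    let left := pvPrefRems m (ds.take mid)
    let right := pvPrefRems m (ds.drop mid)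
    let rL := left.getLastD 0
    (right.foldl
      (fun (st : List Int × Int) rr =>
        (st.1 ++ [PySem.Int.mod (rL * st.2 + rr) m], PySem.Int.mod (st.2 * 10) m))
      (left, PySem.Int.mod 10 m)).1
termination_by ds.length
decreasing_by
  · simp [List.length_take]; omega
  · simp [List.length_drop]; omega

-- ds = [int(c) for c in word]; return [1 if r == 0 else 0 for r in prefrems(ds)]
def divisibilityArray_alt (word : String) (m : Int) : List Int :=
  let ds := word.toList.map pvDigit
  (pvPrefRems m ds).map (fun r => if r == 0 then (1 : Int) else 0)

-- ===== PRECONDITION & SPEC =====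
-- Pre_ excludes exactly the inputs where Python A raises: int(word[i]) raises ValueError on a
-- non-digit character, and % raises ZeroDivisionError when m == 0 (unless the loop is empty).
def Pre_divisibilityArray (word : String) (m : Int) : Prop :=
  word.toList.all PySem.Chars.isdigit = true ∧ (word = "" ∨ m ≠ 0)
instance (word : String) (m : Int) : Decidable (Pre_divisibilityArray word m) := by
  unfold Pre_divisibilityArray; infer_instance
def pvWitness_divisibilityArray : String × Int := ("150", 3)

def Spec_divisibilityArray (word : String) (m : Int) (out : List Int) : Prop := out = divisibilityArray_alt word m
instance (word : String) (m : Int) (out : List Int) : Decidable (Spec_divisibilityArray word m out) := by unfold Spec_divisibilityArray; infer_instance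

-- ===== CLAIM (what is proved, stated in full; the proofs are below) =====
def Claim_equal_divisibilityArray : Prop := ∀ (word : String) (m : Int), Dom_divisibilityArray word m → Pre_divisibilityArray word m → Spec_divisibilityArray word m (divisibilityArray word m)

-- ===== LEMMAS AND PROOFS =====

-- Python's % depends only on the argument's residue class
theorem pvModCongr (a b m : Int) (h : a % m = b % m) : PySem.Int.mod a m = PySem.Int.mod b m := by
  simp only [PySem.Int.mod, Int.fmod_eq_emod, h, Int.dvd_iff_emod_eq_zero]

theorem pvModEmod (a m : Int) : (PySem.Int.mod a m) % m = a % m := by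
  simp only [PySem.Int.mod, Int.fmod_def, Int.sub_mul_emod_self_left]

-- the sequence of prefix remainders of a digit list, as a structural scan (the spec both ports meet)
def pvRemsD (m : Int) (curr : Int) : List Int → List Int
  | [] => []
  | d :: ds =>
    let a := PySem.Int.mod (curr * 10 + d) m
    a :: pvRemsD m a ds

-- the same over characters (A's loop state)
def pvRems (m : Int) (curr : Int) : List Char → List Int
  | [] => []
  | c :: cs =>
    let a := PySem.Int.mod (curr * 10 + (PySem.Int.ofChars? [c]).getD 0) m
    a :: pvRems m a cs

theorem pvRems_map (m : Int) (cs : List Char) : ∀ c, pvRems m c cs = pvRemsD m c (cs.map pvDigit) := by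
  induction cs with
  | nil => intro c; simp [pvRems, pvRemsD]
  | cons x xs ih => intro c; simp [pvRems, pvRemsD, pvDigit, ih]

-- the final loop state (the last prefix remainder, seeded with curr)
def pvFoldRem (m : Int) : Int → List Int → Int
  | c, [] => c
  | c, d :: ds => pvFoldRem m (PySem.Int.mod (c * 10 + d) m) ds

theorem pvRemsD_append (m : Int) (xs ys : List Int) : ∀ c,
    pvRemsD m c (xs ++ ys) = pvRemsD m c xs ++ pvRemsD m (pvFoldRem m c xs) ys := by
  induction xs with
  | nil => intro c; simp [pvRemsD, pvFoldRem]
  | cons x xs ih => intro c; simp [pvRemsD, pvFoldRem, ih]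

theorem pvRemsD_getLastD (m : Int) (xs : List Int) : ∀ c d, xs ≠ [] →
    (pvRemsD m c xs).getLastD d = pvFoldRem m c xs := by
  induction xs with
  | nil => intro c d h; exact absurd rfl h
  | cons x xs ih =>
    intro c d _
    have h1 : pvRemsD m c (x :: xs)
        = PySem.Int.mod (c * 10 + x) m :: pvRemsD m (PySem.Int.mod (c * 10 + x) m) xs := rfl
    have h2 : pvFoldRem m c (x :: xs) = pvFoldRem m (PySem.Int.mod (c * 10 + x) m) xs := rfl
    rw [h1, h2, List.getLastD_cons]
    cases xs with
    | nil => rfl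
    | cons y ys => exact ih _ _ (by simp)

-- B's inner loop as a structural recursion
def pvCombine (m r : Int) : Int → List Int → List Int
  | _, [] => []
  | pw, a :: as => PySem.Int.mod (r * pw + a) m :: pvCombine m r (PySem.Int.mod (pw * 10) m) as

theorem pvCombine_fold (m r : Int) (rs : List Int) : ∀ (out : List Int) (pw : Int),
    (rs.foldl
      (fun (st : List Int × Int) rr =>
        (st.1 ++ [PySem.Int.mod (r * st.2 + rr) m], PySem.Int.mod (st.2 * 10) m))
      (out, pw)).1 = out ++ pvCombine m r pw rs := by
  induction rs with
  | nil => intro out pw; simp [pvCombine]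
  | cons a as ih => intro out pw; simp [List.foldl_cons, pvCombine, ih]

-- shifting a remainder scan: combining with rL·10^k reproduces the scan seeded with c'
theorem pvCombine_shift (m r : Int) (ys : List Int) : ∀ (c c' p pw : Int),
    Int.ModEq m c' (c + r * p) → Int.ModEq m pw (10 * p) →
    pvCombine m r pw (pvRemsD m c ys) = pvRemsD m c' ys := by
  induction ys with
  | nil => intro c c' p pw _ _; rfl
  | cons y ys ih =>
    intro c c' p pw hc hpw
    have ha : Int.ModEq m (PySem.Int.mod (c * 10 + y) m) (c * 10 + y) := pvModEmod _ m
    have key : Int.ModEq m (r * pw + PySem.Int.mod (c * 10 + y) m) (c' * 10 + y) :=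
      calc r * pw + PySem.Int.mod (c * 10 + y) m
          ≡ r * (10 * p) + (c * 10 + y) [ZMOD m] := (hpw.mul_left r).add ha
        _ = (c + r * p) * 10 + y := by ring
        _ ≡ c' * 10 + y [ZMOD m] := (hc.symm.mul_right 10).add_right y
    simp only [pvRemsD, pvCombine]
    congr 1
    · exact pvModCongr _ _ _ key
    · apply ih _ _ (10 * p)
      · calc PySem.Int.mod (c' * 10 + y) m
            ≡ c' * 10 + y [ZMOD m] := pvModEmod _ m
          _ ≡ (c + r * p) * 10 + y [ZMOD m] := (hc.mul_right 10).add_right y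
          _ = (c * 10 + y) + r * (10 * p) := by ring
          _ ≡ PySem.Int.mod (c * 10 + y) m + r * (10 * p) [ZMOD m] := ha.symm.add_right _
      · calc PySem.Int.mod (pw * 10) m
            ≡ pw * 10 [ZMOD m] := pvModEmod _ m
          _ ≡ (10 * p) * 10 [ZMOD m] := hpw.mul_right 10
          _ = 10 * (10 * p) := by ring

-- the divide-and-conquer equals the left-to-right scan
theorem pvPrefRems_eq (m : Int) : ∀ (n : Nat) (ds : List Int), ds.length ≤ n →
    pvPrefRems m ds = pvRemsD m 0 ds := by
  intro n
  induction n with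
  | zero =>
    intro ds h
    have : ds = [] := List.length_eq_zero_iff.mp (Nat.le_zero.mp h)
    subst this; simp [pvPrefRems, pvRemsD]
  | succ n ih =>
    intro ds h
    rw [pvPrefRems]
    by_cases h1 : ds.length ≤ 1
    · simp only [h1, dite_true]
      cases ds with
      | nil => simp [pvRemsD]
      | cons d t =>
        have : t = [] := by simpa using List.length_eq_zero_iff.mp (by simpa using h1)
        subst this
        simp [pvRemsD]
    · simp only [h1, dite_false]
      have hlen : 2 ≤ ds.length := by omega
      have hmid1 : 1 ≤ ds.length / 2 := by omega
      have hmidlt : ds.length / 2 < ds.length := by omega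
      have hL := ih (ds.take (ds.length / 2)) (by simp [List.length_take]; omega)
      have hR := ih (ds.drop (ds.length / 2)) (by simp [List.length_drop]; omega)
      have hlt : (ds.take (ds.length / 2)).length = ds.length / 2 := by
        simp [List.length_take]; omega
      have htne : ds.take (ds.length / 2) ≠ [] := by
        intro hc; rw [hc] at hlt; simp at hlt; omega
      rw [hL, hR, pvCombine_fold, pvRemsD_getLastD m _ 0 0 htne]
      conv_rhs => rw [← List.take_append_drop (ds.length / 2) ds]
      rw [pvRemsD_append]
      congr 1
      apply pvCombine_shift m _ _ 0 _ 1
      · rw [show (0 : Int) + pvFoldRem m 0 (ds.take (ds.length / 2)) * 1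
            = pvFoldRem m 0 (ds.take (ds.length / 2)) by ring]
      · simpa using pvModEmod 10 m

-- A's indexed loop over the zero-filled array produces the mapped remainder scan
set_option maxRecDepth 8192 in
theorem pvA_loop (m : Int) (cs : List Char) (j : Nat) :
    ∀ (k : Nat) (pre : List Int) (curr : Int),
      pre.length = k → k + j = cs.length →
      ((PySem.List.pyRange k cs.length 1).foldl
        (fun (st : List Int × Int) i =>
          let c := PySem.Int.mod (st.2 * 10 + (PySem.Int.ofChars? [PySem.List.pyGetD cs i ' ']).getD 0) m
          if c == 0 then (PySem.List.pySetD st.1 i 1, c) else (st.1, c))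
        (pre ++ List.replicate j 0, curr)).1
      = pre ++ (pvRems m curr (cs.drop k)).map (fun r => if r == 0 then (1 : Int) else 0) := by
  induction j with
  | zero =>
    intro k pre curr hp hk
    have : PySem.List.pyRange (k : Int) (cs.length : Int) 1 = [] := by
      rw [PySem.List.pyRange_one]
      simp; omega
    simp [this, List.drop_of_length_le (by omega : cs.length ≤ k), pvRems]
  | succ j ih =>
    intro k pre curr hp hk
    have hklt : k < cs.length := by omega
    have hkn : (k : Int) < (cs.length : Int) := by exact_mod_cast hklt
    have hget : PySem.List.pyGetD cs (k : Int) ' ' = cs[k] := by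
      simp [List.getD_eq_getElem?_getD, hklt]
    have hdrop : cs.drop k = cs[k] :: cs.drop (k + 1) := by
      rw [List.drop_eq_getElem_cons hklt]
    have hcast : ((k : Int) + 1) = ((k + 1 : Nat) : Int) := by push_cast; ring
    have hset : PySem.List.pySetD (pre ++ List.replicate (j + 1) 0) ((k : Int)) (1 : Int)
        = (pre ++ [(1 : Int)]) ++ List.replicate j 0 := by
      simp [List.replicate_succ, ← hp, List.set_append_right _ _ (le_refl pre.length),
        List.append_assoc]
    have hstep :
        (let c := PySem.Int.mod ((pre ++ List.replicate (j + 1) (0 : Int), curr).2 * 10 +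
            (PySem.Int.ofChars? [PySem.List.pyGetD cs ((k : Int)) ' ']).getD 0) m
         if (c == 0) = true then
           (PySem.List.pySetD (pre ++ List.replicate (j + 1) (0 : Int), curr).1 ((k : Int)) 1, c)
         else ((pre ++ List.replicate (j + 1) (0 : Int), curr).1, c))
        = ((pre ++ [if (PySem.Int.mod (curr * 10 + (PySem.Int.ofChars? [cs[k]]).getD 0) m == 0) = true
              then (1 : Int) else 0]) ++ List.replicate j 0,
           PySem.Int.mod (curr * 10 + (PySem.Int.ofChars? [cs[k]]).getD 0) m) := by
      simp only [hget]
      by_cases h0 : PySem.Int.mod (curr * 10 + (PySem.Int.ofChars? [cs[k]]).getD 0) m = 0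
      · simp [h0, hset]
      · have hb : (PySem.Int.mod (curr * 10 + (PySem.Int.ofChars? [cs[k]]).getD 0) m == 0) = false := by
          simp [h0]
        simp [hb, List.replicate_succ, List.append_assoc]
    rw [PySem.List.pyRange_one_cons hkn, List.foldl_cons, hstep, hcast,
      ih (k + 1) _ _ (by simp [hp]) (by omega), hdrop]
    simp [pvRems, List.append_assoc]

theorem pvA_eq_alt (word : String) (m : Int) :
    divisibilityArray word m = divisibilityArray_alt word m := by
  unfold divisibilityArray divisibilityArray_alt
  have hinit : (List.range word.toList.length).map (fun _ => (0 : Int))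
      = List.replicate word.toList.length 0 := by
    simp [List.map_const']
  simp only [hinit]
  have := pvA_loop m word.toList word.toList.length 0 [] 0 rfl (by omega)
  simp only [Nat.cast_zero, List.nil_append, List.drop_zero] at this
  rw [this, pvPrefRems_eq m word.toList.length _ (by simp), ← pvRems_map]

-- ===== VERDICT (by name: the statement is the Claim_ definition above) =====
theorem divisibilityArray_spec : Claim_equal_divisibilityArray := by
  intro word m _ _
  unfold Spec_divisibilityArray
  exact pvA_eq_alt word m
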